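-- pv_equiv track=rewrite | github.com/letgodchan0/Al_Is_Well | 1주차/0606/지은/더 맵게.py | solution
-- ===== SOURCE A (Python) =====
-- import heapq    #데이터를 정렬된 상태로 저장할 수 있다. 최소힙
--
-- def solution(scoville, K):
--     answer = 0
--     heapq.heapify(scoville)
--     while scoville[0] < K:
--         if len(scoville)==1:
--             return -1
--         else:
--             a = heapq.heappop(scoville)
--             b = heapq.heappop(scoville)
--             heapq.heappush(scoville, a + (b * 2))
--             answer += 1
--     return answer
-- ===== SOURCE B (Python) =====
-- def solution(scoville, K):
--     # Two-queue (Huffman-style) technique: sort the originals once; merged values are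
--     # produced in nondecreasing order, so they form a second sorted FIFO queue.  The
--     # overall minimum is always the smaller of the two queue fronts -- no heap and no
--     # sorted-insertion maintenance is ever needed.
--     q1 = sorted(scoville)
--     q2 = []
--     i = j = 0
--     answer = 0
--     while True:
--         if i < len(q1) and (j >= len(q2) or q1[i] <= q2[j]):
--             m = q1[i]
--         else:
--             m = q2[j]          # IndexError when nothing remains (empty input)
--         if m >= K:
--             return answer
--         if (len(q1) - i) + (len(q2) - j) == 1:
--             return -1
--         a, i, j = _pop(q1, i, q2, j)
--         b, i, j = _pop(q1, i, q2, j)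
--         q2.append(a + b * 2)
--         answer += 1
--
-- def _pop(q1, i, q2, j):
--     # pop the smaller of the two queue fronts (tie -> original queue)
--     if i < len(q1) and (j >= len(q2) or q1[i] <= q2[j]):
--         return q1[i], i + 1, j
--     return q2[j], i, j + 1
-- ===== Notes on version B (the rewrite author's own statement) =====
-- stated objective: faster
-- what changed: Replaces the heap with the classic two-queue Huffman technique: sort the input once, keep merged values in a plain FIFO queue (provably produced in nondecreasing order), and take each minimum as the smaller of the two queue fronts, so no per-step heap sifting or sorted insertion is ever done; B also does not mutate its argument, unlike A's in-place heapify.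
import Mathlib
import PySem

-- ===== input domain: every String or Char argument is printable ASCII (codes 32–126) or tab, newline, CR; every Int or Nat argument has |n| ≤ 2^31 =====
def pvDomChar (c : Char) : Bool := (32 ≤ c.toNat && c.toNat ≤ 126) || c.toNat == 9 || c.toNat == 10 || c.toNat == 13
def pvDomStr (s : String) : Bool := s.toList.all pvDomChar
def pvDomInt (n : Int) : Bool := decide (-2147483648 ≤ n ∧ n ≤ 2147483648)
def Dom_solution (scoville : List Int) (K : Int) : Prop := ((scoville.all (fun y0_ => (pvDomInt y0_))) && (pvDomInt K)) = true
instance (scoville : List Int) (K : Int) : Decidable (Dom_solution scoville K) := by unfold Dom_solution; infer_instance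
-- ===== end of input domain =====

-- B replaces A's binary heap by the two-queue Huffman technique (sort once; merged values go to a
-- FIFO queue, which stays sorted; the minimum is the smaller queue front); equivalence is about the
-- RETURN value only: A heapifies/pops its argument in place, B does not mutate it.

-- ===== PORT A =====
-- heapq is ported by the library's contract over Int: after heapify (and after each pop/push, here
-- re-established by pyHeapify) a minimal element sits at index 0 and heappop removes and returns it;
-- the values observed by A's code (scoville[0] and the popped elements) are exactly Python's.
def pyHeapify (h : List Int) : List Int :=
  match PySem.List.min? h (fun x => x) with
  | none => []
  | some m => m :: h.erase m

-- fuel = the list's length bounds the loop (each merge shortens the heap by one); the 0 case is never reached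
def solGo : Nat → List Int → Int → Int → Int
  | 0, _, _, _ => 0
  | fuel + 1, h, K, answer =>
    match h with
    | [] => 0      -- unreachable: Python raises IndexError on the empty heap (excluded by Pre_)
    | a :: t =>
      if a < K then
        if t = [] then -1
        else
          match pyHeapify t with   -- a = heappop; b = heappop; heappush (a + b*2)
          | [] => 0  -- unreachable: t ≠ []
          | b :: t2 => solGo fuel (pyHeapify ((a + b * 2) :: t2)) K (answer + 1)
      else answer

def solution (scoville : List Int) (K : Int) : Int :=
  solGo scoville.length (pyHeapify scoville) K 0

-- ===== PORT B =====
-- B keeps the sorted originals q1 and the FIFO queue of merged values q2; Python's index pointers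
-- i/j into the two lists are ported as list consumption (advancing i = dropping q1's head,
-- q2.append = appending at the end).  bPop is _pop: the smaller of the two fronts, tie -> q1;
-- Python's inline computation of the current minimum m uses the identical conditional, so the
-- port reads it as (bPop q1 q2).1.
def bPop (q1 q2 : List Int) : Int × List Int × List Int :=
  match q1, q2 with
  | [], [] => (0, [], [])          -- unreachable in B (IndexError in Python; excluded by Pre_)
  | x :: t1, [] => (x, t1, [])
  | [], y :: t2 => (y, [], t2)
  | x :: t1, y :: t2 => if x ≤ y then (x, t1, y :: t2) else (y, x :: t1, t2)

-- fuel = the list's length bounds the loop here too; the 0 case is never reached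
def bGo : Nat → List Int → List Int → Int → Int → Int
  | 0, _, _, _, _ => 0
  | fuel + 1, q1, q2, K, answer =>
    if q1 = [] ∧ q2 = [] then 0   -- unreachable: Python raises IndexError (excluded by Pre_)
    else if K ≤ (bPop q1 q2).1 then answer        -- if m >= K: return answer
    else if q1.length + q2.length = 1 then -1
    else                                          -- a, b = the two pops; q2.append(a + b*2)
      bGo fuel (bPop (bPop q1 q2).2.1 (bPop q1 q2).2.2).2.1
        ((bPop (bPop q1 q2).2.1 (bPop q1 q2).2.2).2.2 ++
          [(bPop q1 q2).1 + (bPop (bPop q1 q2).2.1 (bPop q1 q2).2.2).1 * 2])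
        K (answer + 1)

def solution_alt (scoville : List Int) (K : Int) : Int :=
  bGo (PySem.List.sorted scoville (fun x => x) false).length
    (PySem.List.sorted scoville (fun x => x) false) [] K 0

-- ===== PRECONDITION & SPEC =====
-- Pre_ excludes only the empty list, on which both Pythons raise IndexError.
def Pre_solution (scoville : List Int) (K : Int) : Prop := scoville ≠ []
instance (scoville : List Int) (K : Int) : Decidable (Pre_solution scoville K) := by unfold Pre_solution; infer_instance
def pvWitness_solution : List Int × Int := ([1, 2, 3, 9, 10, 12], 7)

def Spec_solution (scoville : List Int) (K : Int) (out : Int) : Prop := out = solution_alt scoville K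
instance (scoville : List Int) (K : Int) (out : Int) : Decidable (Spec_solution scoville K out) := by unfold Spec_solution; infer_instance

-- ===== CLAIM (what is proved, stated in full; the proofs are below) =====
def Claim_equal_solution : Prop := ∀ (scoville : List Int) (K : Int), Dom_solution scoville K → Pre_solution scoville K → Spec_solution scoville K (solution scoville K)

-- ===== LEMMAS AND PROOFS =====

-- the invariant carried on B's merged queue q2: it is sorted and every element is at most
-- three times any later one (this is what makes the plain FIFO a sorted queue)
def QR (u v : Int) : Prop := u ≤ v ∧ v ≤ 3 * u

theorem bPop_shape (q1 q2 : List Int) (h : ¬(q1 = [] ∧ q2 = [])) :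
    (q1 = (bPop q1 q2).1 :: (bPop q1 q2).2.1 ∧ (bPop q1 q2).2.2 = q2) ∨
    (q2 = (bPop q1 q2).1 :: (bPop q1 q2).2.2 ∧ (bPop q1 q2).2.1 = q1) := by
  match q1, q2 with
  | [], [] => exact absurd ⟨rfl, rfl⟩ h
  | x :: t1, [] => left; simp [bPop]
  | [], y :: t2 => right; simp [bPop]
  | x :: t1, y :: t2 => by_cases hxy : x ≤ y <;> simp [bPop, hxy]

theorem bPop_min (q1 q2 : List Int) (hs1 : q1.Pairwise (· ≤ ·)) (hs2 : q2.Pairwise (· ≤ ·)) :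
    ∀ y ∈ q1 ++ q2, (bPop q1 q2).1 ≤ y := by
  match q1, q2 with
  | [], [] => simp
  | x :: t1, [] =>
      intro y hy
      simp only [bPop, List.append_nil] at *
      rcases List.mem_cons.mp hy with rfl | hy
      · exact le_refl y
      · exact (List.pairwise_cons.mp hs1).1 y hy
  | [], y0 :: t2 =>
      intro y hy
      simp only [bPop, List.nil_append] at *
      rcases List.mem_cons.mp hy with rfl | hy
      · exact le_refl y
      · exact (List.pairwise_cons.mp hs2).1 y hy
  | x :: t1, y0 :: t2 =>
      intro y hy
      by_cases hxy : x ≤ y0 <;> simp only [bPop, hxy, if_pos, ite_false]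
      · rcases List.mem_append.mp hy with hy | hy
        · rcases List.mem_cons.mp hy with rfl | hy
          · exact le_refl y
          · exact (List.pairwise_cons.mp hs1).1 y hy
        · rcases List.mem_cons.mp hy with rfl | hy
          · exact hxy
          · exact le_trans hxy ((List.pairwise_cons.mp hs2).1 y hy)
      · have hyx : y0 ≤ x := le_of_not_ge hxy
        rcases List.mem_append.mp hy with hy | hy
        · rcases List.mem_cons.mp hy with rfl | hy
          · exact hyx
          · exact le_trans hyx ((List.pairwise_cons.mp hs1).1 y hy)
        · rcases List.mem_cons.mp hy with rfl | hy
          · exact le_refl y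
          · exact (List.pairwise_cons.mp hs2).1 y hy

theorem bPop_perm (q1 q2 : List Int) (h : ¬(q1 = [] ∧ q2 = [])) :
    ((bPop q1 q2).1 :: ((bPop q1 q2).2.1 ++ (bPop q1 q2).2.2)).Perm (q1 ++ q2) := by
  rcases bPop_shape q1 q2 h with ⟨h1, h2⟩ | ⟨h1, h2⟩
  · rw [h2]
    conv_rhs => rw [h1]
    simp
  · rw [h2]
    conv_rhs => rw [h1]
    exact (List.perm_middle).symm

-- The joint loop invariant: A's heap holds the same multiset as q1 ++ q2; q1 is sorted, q2 is
-- QR-pairwise, and every merged value is at most three times any original still in q1.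
theorem key_lemma : ∀ (n : ℕ) (h q1 q2 : List Int) (K ans : Int), h.length = n →
    h.Perm (q1 ++ q2) → q1.Pairwise (· ≤ ·) → q2.Pairwise QR →
    (∀ v ∈ q2, ∀ r ∈ q1, v ≤ 3 * r) →
    solGo n (pyHeapify h) K ans = bGo n q1 q2 K ans := by
  intro n
  induction n using Nat.strong_induction_on with
  | _ n ih =>
    intro h q1 q2 K ans hlen hperm hs1 hs2 hcross
    have hs2' : q2.Pairwise (· ≤ ·) := hs2.imp (fun hr => hr.1)
    cases h with
    | nil =>
        have hq : q1 ++ q2 = [] := hperm.nil_eq.symm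
        rcases List.append_eq_nil_iff.mp hq with ⟨e1, e2⟩
        subst e1; subst e2
        have hn : n = 0 := by simpa using hlen.symm
        subst hn
        rfl
    | cons x h' =>
        have hqne : ¬(q1 = [] ∧ q2 = []) := by
          intro ⟨e1, e2⟩
          rw [e1, e2] at hperm
          have := hperm.length_eq
          simp at this
        cases hm : PySem.List.min? (x :: h') (fun y => y) with
        | none => exact absurd ((PySem.List.min?_eq_none_iff _ _).mp hm) (by simp)
        | some m =>
          have hmem : m ∈ x :: h' := PySem.List.min?_mem hm
          have hmin : ∀ y ∈ x :: h', m ≤ y := by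
            intro y hy; simpa using PySem.List.min?_isMin hm y hy
          have hHeap : pyHeapify (x :: h') = m :: (x :: h').erase m := by
            unfold pyHeapify; rw [hm]
          -- B's first pop
          rcases hp : bPop q1 q2 with ⟨a, q1a, q2a⟩
          have hpA : (bPop q1 q2).1 = a := by rw [hp]
          have hpB : (bPop q1 q2).2.1 = q1a := by rw [hp]
          have hpC : (bPop q1 q2).2.2 = q2a := by rw [hp]
          have hsh1 := bPop_shape q1 q2 hqne
          rw [hpA, hpB, hpC] at hsh1
          have haq : a ∈ q1 ++ q2 := by
            rcases hsh1 with ⟨e, _⟩ | ⟨e, _⟩ <;> rw [e] <;> simp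
          have hma : m = a := by
            have h1 := hmin a (hperm.symm.subset haq)
            have h2 := bPop_min q1 q2 hs1 hs2' m (hperm.subset hmem)
            rw [hpA] at h2
            exact le_antisymm h1 h2
          have hn : n = h'.length + 1 := by simpa using hlen.symm
          subst hn
          rw [hHeap]
          simp only [solGo, bGo]
          simp only [if_neg hqne, hpA, hpB, hpC]
          by_cases hK : m < K
          · have hKle : ¬ K ≤ a := by omega
            simp only [if_pos hK, if_neg hKle]
            have hlenq : q1.length + q2.length = h'.length + 1 := by
              have := hperm.length_eq; simp at this; omega
            by_cases h1case : h' = []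
            · subst h1case
              have hl1 : q1.length + q2.length = 1 := by simpa using hlenq
              have hmx : m = x := by simpa using hmem
              subst hmx
              simp [hl1]
            · have hl1 : ¬ (q1.length + q2.length = 1) := by
                intro hc
                rw [hc] at hlenq
                exact h1case (List.eq_nil_of_length_eq_zero (by omega))
              rw [if_neg hl1]
              -- t := the heap after the first pop
              have htperm : ((x :: h').erase m).Perm (q1a ++ q2a) := by
                have hbp := bPop_perm q1 q2 hqne
                rw [hpA, hpB, hpC] at hbp
                have h1 : (m :: (x :: h').erase m).Perm (m :: (q1a ++ q2a)) :=
                  ((List.perm_cons_erase hmem).symm.trans hperm).trans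
                    (by rw [hma]; exact hbp.symm)
                exact h1.cons_inv
              have htne : (x :: h').erase m ≠ [] := by
                intro hc
                have hlc := congrArg List.length hc
                rw [List.length_erase_of_mem hmem] at hlc
                simp only [List.length_cons, List.length_nil] at hlc
                exact h1case (List.eq_nil_of_length_eq_zero (by omega))
              simp only [if_neg htne]
              -- invariants for (q1a, q2a)
              have hsub1a : ∀ y ∈ q1a, y ∈ q1 := by
                rcases hsh1 with ⟨e, _⟩ | ⟨_, e⟩
                · intro y hy; rw [e]; exact List.mem_cons_of_mem _ hy
                · intro y hy; rw [e] at hy; exact hy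
              have hsub2a : ∀ y ∈ q2a, y ∈ q2 := by
                rcases hsh1 with ⟨_, e⟩ | ⟨e, _⟩
                · intro y hy; rw [e] at hy; exact hy
                · intro y hy; rw [e]; exact List.mem_cons_of_mem _ hy
              have hs1a : q1a.Pairwise (· ≤ ·) := by
                rcases hsh1 with ⟨e, _⟩ | ⟨_, e⟩
                · rw [e] at hs1; exact (List.pairwise_cons.mp hs1).2
                · rw [e]; exact hs1
              have hs2a : q2a.Pairwise QR := by
                rcases hsh1 with ⟨_, e⟩ | ⟨e, _⟩
                · rw [e]; exact hs2
                · rw [e] at hs2; exact (List.pairwise_cons.mp hs2).2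
              have hs2a' : q2a.Pairwise (· ≤ ·) := hs2a.imp (fun hr => hr.1)
              -- every element of q2a is ≤ 3 * a
              have h3a : ∀ v ∈ q2a, v ≤ 3 * a := by
                rcases hsh1 with ⟨e, e2⟩ | ⟨e, _⟩
                · intro v hv
                  exact hcross v (hsub2a v hv) a (by rw [e]; exact List.mem_cons_self)
                · intro v hv
                  rw [e] at hs2
                  exact ((List.pairwise_cons.mp hs2).1 v hv).2
              -- B's second pop
              have hane : ¬(q1a = [] ∧ q2a = []) := by
                intro ⟨e1, e2⟩
                rw [e1, e2] at htperm
                exact htne htperm.eq_nil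
              rcases hp2 : bPop q1a q2a with ⟨b, q1b, q2b⟩
              have hqA : (bPop q1a q2a).1 = b := by rw [hp2]
              have hqB : (bPop q1a q2a).2.1 = q1b := by rw [hp2]
              have hqC : (bPop q1a q2a).2.2 = q2b := by rw [hp2]
              have hsh2 := bPop_shape q1a q2a hane
              rw [hqA, hqB, hqC] at hsh2
              -- heap-side second pop: the minimum of the erased heap
              cases hm2 : PySem.List.min? ((x :: h').erase m) (fun y => y) with
              | none =>
                  exact absurd ((PySem.List.min?_eq_none_iff _ _).mp hm2) htne
              | some b2 =>
                have hmem2 : b2 ∈ (x :: h').erase m := PySem.List.min?_mem hm2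
                have hmin2 : ∀ y ∈ (x :: h').erase m, b2 ≤ y := by
                  intro y hy; simpa using PySem.List.min?_isMin hm2 y hy
                have hHeap2 : pyHeapify ((x :: h').erase m) = b2 :: ((x :: h').erase m).erase b2 := by
                  unfold pyHeapify; rw [hm2]
                have hbq : b ∈ q1a ++ q2a := by
                  rcases hsh2 with ⟨e, _⟩ | ⟨e, _⟩ <;> rw [e] <;> simp
                have hbb : b2 = b := by
                  have h1 := hmin2 b (htperm.symm.subset hbq)
                  have h2 := bPop_min q1a q2a hs1a hs2a' b2 (htperm.subset hmem2)
                  rw [hqA] at h2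
                  exact le_antisymm h1 h2
                -- a ≤ b, and b bounds everything still present
                have hab : a ≤ b := by
                  have := bPop_min q1 q2 hs1 hs2' b (by
                    have hbp := bPop_perm q1 q2 hqne
                    rw [hpA, hpB, hpC] at hbp
                    exact hbp.subset (List.mem_cons_of_mem _ hbq))
                  rw [hpA] at this
                  exact this
                have hbmin : ∀ y ∈ q1a ++ q2a, b ≤ y := by
                  intro y hy
                  have := bPop_min q1a q2a hs1a hs2a' y hy
                  rw [hqA] at this
                  exact this
                have hsub1b : ∀ y ∈ q1b, y ∈ q1a := by
                  rcases hsh2 with ⟨e, _⟩ | ⟨_, e⟩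
                  · intro y hy; rw [e]; exact List.mem_cons_of_mem _ hy
                  · intro y hy; rw [e] at hy; exact hy
                have hsub2b : ∀ y ∈ q2b, y ∈ q2a := by
                  rcases hsh2 with ⟨_, e⟩ | ⟨e, _⟩
                  · intro y hy; rw [e] at hy; exact hy
                  · intro y hy; rw [e]; exact List.mem_cons_of_mem _ hy
                have h3b : ∀ v ∈ q2b, v ≤ 3 * b := by
                  rcases hsh2 with ⟨e, e2⟩ | ⟨e, _⟩
                  · intro v hv
                    have hv2 : v ∈ q2 := hsub2a v (hsub2b v hv)
                    exact hcross v hv2 b (hsub1a b (by rw [e]; exact List.mem_cons_self))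
                  · intro v hv
                    rw [e] at hs2a
                    exact ((List.pairwise_cons.mp hs2a).1 v hv).2
                -- reduce the heap-side match via hHeap2
                split
                · next heq => rw [hHeap2] at heq; exact absurd heq (by simp)
                · next c t2 heq =>
                    rw [hHeap2] at heq
                    obtain ⟨rfl, rfl⟩ : b2 = c ∧ ((x :: h').erase m).erase b2 = t2 :=
                      ⟨(List.cons.injEq .. ▸ heq).1, (List.cons.injEq .. ▸ heq).2⟩
                    -- permutation for the next state
                    have hperm' : ((m + b2 * 2) :: ((x :: h').erase m).erase b2).Perm
                        (q1b ++ (q2b ++ [a + b * 2])) := by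
                      have ht2 : (((x :: h').erase m).erase b2).Perm (q1b ++ q2b) := by
                        have hbp2 := bPop_perm q1a q2a hane
                        rw [hqA, hqB, hqC] at hbp2
                        have h1 : (b2 :: ((x :: h').erase m).erase b2).Perm (b2 :: (q1b ++ q2b)) :=
                          ((List.perm_cons_erase hmem2).symm.trans htperm).trans
                            (by rw [hbb]; exact hbp2.symm)
                        exact h1.cons_inv
                      have hval : m + b2 * 2 = a + b * 2 := by rw [hma, hbb]
                      rw [hval]
                      have hstep : ((a + b * 2) :: (q1b ++ q2b)).Perm
                          (q1b ++ (q2b ++ [a + b * 2])) := by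
                        have h1 := (List.perm_append_singleton (a + b * 2) (q1b ++ q2b)).symm
                        rwa [List.append_assoc] at h1
                      exact (ht2.cons _).trans hstep
                    -- invariants for the next state
                    have hs1b : q1b.Pairwise (· ≤ ·) := by
                      rcases hsh2 with ⟨e, _⟩ | ⟨_, e⟩
                      · rw [e] at hs1a; exact (List.pairwise_cons.mp hs1a).2
                      · rw [e]; exact hs1a
                    have hs2b : (q2b ++ [a + b * 2]).Pairwise QR := by
                      rw [List.pairwise_append]
                      refine ⟨?_, by simp, ?_⟩
                      · rcases hsh2 with ⟨_, e⟩ | ⟨e, _⟩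
                        · rw [e]; exact hs2a
                        · rw [e] at hs2a; exact (List.pairwise_cons.mp hs2a).2
                      · intro v hv w hw
                        rw [List.mem_singleton] at hw
                        subst hw
                        have h1 : v ≤ 3 * a := h3a v (hsub2b v hv)
                        have h2 : v ≤ 3 * b := h3b v hv
                        have h3 : b ≤ v := hbmin v (List.mem_append_right _ (hsub2b v hv))
                        exact ⟨by omega, by omega⟩
                    have hcrossb : ∀ v ∈ q2b ++ [a + b * 2], ∀ r ∈ q1b, v ≤ 3 * r := by
                      intro v hv r hr
                      have hbr : b ≤ r := hbmin r (List.mem_append_left _ (hsub1b r hr))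
                      rcases List.mem_append.mp hv with hv | hv
                      · exact hcross v (hsub2a v (hsub2b v hv)) r (hsub1a r (hsub1b r hr))
                      · rw [List.mem_singleton] at hv
                        subst hv
                        omega
                    -- length bookkeeping and the induction hypothesis
                    have hlen' : ((m + b2 * 2) :: ((x :: h').erase m).erase b2).length = h'.length := by
                      have e1 : ((x :: h').erase m).length = h'.length := by
                        rw [List.length_erase_of_mem hmem]; simp
                      have e2 : (((x :: h').erase m).erase b2).length
                          = ((x :: h').erase m).length - 1 := List.length_erase_of_mem hmem2
                      have hpos : 0 < h'.length := List.length_pos_of_ne_nil h1case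
                      simp [e2, e1]
                      omega
                    exact ih h'.length (by omega) _ q1b (q2b ++ [a + b * 2]) K (ans + 1)
                      hlen' hperm' hs1b hs2b hcrossb
          · have hKle : K ≤ a := by omega
            simp only [if_neg hK, if_pos hKle]

theorem solution_eq (scoville : List Int) (K : Int) :
    solution scoville K = solution_alt scoville K := by
  unfold solution solution_alt
  rw [(PySem.List.sorted_perm scoville (fun x => x) false).length_eq]
  exact key_lemma scoville.length scoville (PySem.List.sorted scoville (fun x => x) false) [] K 0 rfl
    (by simpa using (PySem.List.sorted_perm scoville (fun x => x) false).symm)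
    (by simpa using PySem.List.sorted_pairwise scoville (fun x => x))
    (by simp)
    (by simp)

-- ===== VERDICT (by name: the statement is the Claim_ definition above) =====
theorem solution_spec : Claim_equal_solution := by
  intro scoville K _ _
  unfold Spec_solution
  exact solution_eq scoville K
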